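-- pv_equiv track=rewrite | github.com/annamarigold/OnionPuzzle | pythonProject2/main.py | decode_5_symbols
-- ===== SOURCE A (Python) =====
-- def decode_5_symbols(st, layer):
--     r = 0
--     if len(st) < 5:
--         for n in range(5 - len(st)):
--             st = st + 'u'
--     for i in range(0, 5):
--         r = r + (ord(st[i]) - 33) * pow(85, 4 - i)
--     r = format(r, '032b')  # 4 bytes in binary with leading zeros
--     # if layer < 3:
--     #     r = encode_str(r, layer)
--     return r
-- ===== SOURCE B (Python) =====
-- def decode_5_symbols(st, layer):
--     r = 0
--     for c in (st + 'uuuuu')[:5]: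
--         r = r * 85 + (ord(c) - 33)
--     return format(r, '032b')
-- ===== Notes on version B (the rewrite author's own statement) =====
-- stated objective: idiomatic
-- what changed: Replaced the conditional padding loop plus the indexed sum of (ord(st[i])-33)*85**(4-i) with a single Horner fold r = r*85 + (ord(c)-33) over the first five characters of st+'uuuuu', removing the length guard, the index loop and the per-term pow.
import Mathlib
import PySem

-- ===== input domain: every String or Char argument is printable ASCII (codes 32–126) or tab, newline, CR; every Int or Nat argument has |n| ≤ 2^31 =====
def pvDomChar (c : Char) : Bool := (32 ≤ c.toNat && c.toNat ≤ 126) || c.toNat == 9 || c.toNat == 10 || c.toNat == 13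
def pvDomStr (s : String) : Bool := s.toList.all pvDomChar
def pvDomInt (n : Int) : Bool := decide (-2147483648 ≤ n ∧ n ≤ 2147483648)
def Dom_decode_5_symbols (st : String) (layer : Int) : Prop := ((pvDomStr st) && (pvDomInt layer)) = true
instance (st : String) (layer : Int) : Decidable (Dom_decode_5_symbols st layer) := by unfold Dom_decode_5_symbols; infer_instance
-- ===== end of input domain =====

-- B replaces the per-index power loop with a single left-to-right Horner fold over the padded prefix (idiomatic/simpler; same cost).

-- ===== PORT A =====
-- A: pad with 'u' up to length 5 via a counting loop, then sum (ord(st[i])-33)*85^(4-i) for i in range(0,5), then format(r,'032b').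
def decode_5_symbols (st : String) (layer : Int) : String :=
  let cs := st.toList
  let cs := if PySem.List.len cs < 5 then
      (PySem.List.pyRange 0 (5 - PySem.List.len cs) 1).foldl (fun acc _ => acc ++ ['u']) cs
    else cs
  let r : Int := (PySem.List.pyRange 0 5 1).foldl
      (fun r i => r + (((PySem.List.pyGetD cs i 'u').toNat : Int) - 33) * 85 ^ (4 - i).toNat) 0
  PySem.Str.zfill (PySem.Int.toBin r) 32   -- format(r, '032b')

-- ===== PORT B =====
-- B: Horner fold r = r*85 + (ord(c)-33) over the first five chars of st + 'uuuuu', then format(r,'032b').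
def decode_5_symbols_alt (st : String) (layer : Int) : String :=
  let cs := (st.toList ++ ['u', 'u', 'u', 'u', 'u']).take 5   -- (st + 'uuuuu')[:5]
  let r : Int := cs.foldl (fun r c => r * 85 + ((c.toNat : Int) - 33)) 0
  PySem.Str.zfill (PySem.Int.toBin r) 32   -- format(r, '032b')

-- ===== PRECONDITION & SPEC =====
def Spec_decode_5_symbols (st : String) (layer : Int) (out : String) : Prop := out = decode_5_symbols_alt st layer
instance (st : String) (layer : Int) (out : String) : Decidable (Spec_decode_5_symbols st layer out) := by unfold Spec_decode_5_symbols; infer_instance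

-- ===== CLAIM (what is proved, stated in full; the proofs are below) =====
def Claim_equal_decode_5_symbols : Prop := ∀ (st : String) (layer : Int), Dom_decode_5_symbols st layer → Spec_decode_5_symbols st layer (decode_5_symbols st layer)

-- ===== LEMMAS AND PROOFS =====


theorem pvRange05 : PySem.List.pyRange 0 5 1 = [0, 1, 2, 3, 4] := by decide
theorem pvRange04 : PySem.List.pyRange 0 4 1 = [0, 1, 2, 3] := by decide
theorem pvRange03 : PySem.List.pyRange 0 3 1 = [0, 1, 2] := by decide
theorem pvRange02 : PySem.List.pyRange 0 2 1 = [0, 1] := by decide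
theorem pvRange01 : PySem.List.pyRange 0 1 1 = [0] := by decide

theorem decode_ports_agree (l : List Char) :
    decode_5_symbols (String.ofList l) 0 = decode_5_symbols_alt (String.ofList l) 0 := by
  match l with
  | [] => decide
  | [a] =>
      simp [decode_5_symbols, decode_5_symbols_alt, PySem.List.len, pvRange05, pvRange04,
        PySem.List.pyGetD, PySem.List.pyGet?, PySem.List.pyIdx?]
      ring_nf
  | [a, b] =>
      simp [decode_5_symbols, decode_5_symbols_alt, PySem.List.len, pvRange05, pvRange03,
        PySem.List.pyGetD, PySem.List.pyGet?, PySem.List.pyIdx?]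
      ring_nf
  | [a, b, c] =>
      simp [decode_5_symbols, decode_5_symbols_alt, PySem.List.len, pvRange05, pvRange02,
        PySem.List.pyGetD, PySem.List.pyGet?, PySem.List.pyIdx?]
      ring_nf
  | [a, b, c, d] =>
      simp [decode_5_symbols, decode_5_symbols_alt, PySem.List.len, pvRange05, pvRange01,
        PySem.List.pyGetD, PySem.List.pyGet?, PySem.List.pyIdx?]
      ring_nf
  | a :: b :: c :: d :: e :: rest =>
      have h5 : ¬ ((rest.length : Int) + 1 + 1 + 1 + 1 + 1 < 5) := by omega
      have e0 : (0:Int) ≤ (rest.length : Int) + 1 + 1 + 1 + 1 := by omega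
      have e1 : (0:Int) ≤ (rest.length : Int) + 1 + 1 + 1 := by omega
      have e2 : (2:Int) ≤ (rest.length : Int) + 1 + 1 + 1 + 1 := by omega
      have e3 : (3:Int) ≤ (rest.length : Int) + 1 + 1 + 1 + 1 := by omega
      have e4 : (4:Int) ≤ (rest.length : Int) + 1 + 1 + 1 + 1 := by omega
      simp [decode_5_symbols, decode_5_symbols_alt, PySem.List.len, pvRange05, h5,
        PySem.List.pyGetD, PySem.List.pyGet?, PySem.List.pyIdx?]
      rw [if_pos e0, if_pos e1, if_pos e2, if_pos e3, if_pos e4]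
      simp
      ring_nf

-- ===== VERDICT (by name: the statement is the Claim_ definition above) =====
theorem decode_5_symbols_spec : Claim_equal_decode_5_symbols := by
  intro st layer _
  unfold Spec_decode_5_symbols
  have h := decode_ports_agree st.toList
  simpa using h
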